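-- pv_equiv track=rewrite | github.com/vitorvalle45-stack/bot-alertas-viagem | traducoes.py | detectar_idioma
-- ===== SOURCE A (Python) =====
-- REGIAO_IDIOMA = {
--     "BR": "pt",
--     "US": "en",
--     "UK": "en",
--     "AU": "en",
--     "CA": "en",
--     "EU": "en",  # Europa usa ingles como padrao (multi-idioma)
--     "CH": "en",
--     "AE": "en",
--     "JP": "ja",
--     "KR": "ko",
--     "DK": "en",  # Nordicos entendem ingles
--     "SE": "en",
--     "NO": "en",
--     "MX": "es",
-- }
--
-- LANG_CODE_MAP = {
--     "pt": "pt", "pt-br": "pt", "pt_br": "pt",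
--     "es": "es", "es-419": "es", "es_mx": "es", "es_es": "es",
--     "fr": "fr", "fr-fr": "fr", "fr_fr": "fr",
--     "de": "de", "de-de": "de", "de_de": "de", "de-ch": "de",
--     "it": "it", "it-it": "it", "it_it": "it",
--     "ja": "ja", "ja-jp": "ja",
--     "ko": "ko", "ko-kr": "ko",
--     "nl": "nl", "nl-nl": "nl",
-- }
--
-- def detectar_idioma(language_code: str = "", regiao: str = "") -> str:
--     """
--     Detecta o idioma do usuario baseado em:
--     1. Regiao selecionada (BR=pt, MX=es, JP=ja, KR=ko)
--     2. language_code do Telegram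
--     3. Fallback: en (ingles)
--     """
--     # Regiao define idioma primario
--     if regiao in REGIAO_IDIOMA:
--         idioma_regiao = REGIAO_IDIOMA[regiao]
--         if idioma_regiao != "en":
--             return idioma_regiao
--
--     # Telegram language_code pode refinar
--     if language_code:
--         lang = language_code.lower().replace("-", "_")
--         for code, idioma in LANG_CODE_MAP.items():
--             if lang == code.replace("-", "_") or lang.startswith(code.split("-")[0]):
--                 return idioma
--
--     return "en"
-- ===== SOURCE B (Python) =====
-- REGIAO_IDIOMA = {
--     "BR": "pt",
--     "US": "en",
--     "UK": "en",
--     "AU": "en",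
--     "CA": "en",
--     "EU": "en",
--     "CH": "en",
--     "AE": "en",
--     "JP": "ja",
--     "KR": "ko",
--     "DK": "en",
--     "SE": "en",
--     "NO": "en",
--     "MX": "es",
-- }
--
-- # Every group in the original LANG_CODE_MAP starts with its bare 2-letter code,
-- # so the whole scan collapses to one lookup on the first two characters.
-- PREFIXO_IDIOMA = {
--     "pt": "pt", "es": "es", "fr": "fr", "de": "de",
--     "it": "it", "ja": "ja", "ko": "ko", "nl": "nl",
-- }
--
-- def detectar_idioma(language_code: str = "", regiao: str = "") -> str:
--     idioma = REGIAO_IDIOMA.get(regiao, "en")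
--     if idioma != "en":
--         return idioma
--     lang = language_code.lower().replace("-", "_")
--     return PREFIXO_IDIOMA.get(lang[:2], "en")
-- ===== Notes on version B (the rewrite author's own statement) =====
-- stated objective: simpler
-- what changed: B replaces A's 23-entry scan over LANG_CODE_MAP (with per-entry replace/split/startswith tests) by a single lookup of the first two characters of the normalized language code in an 8-entry prefix table, exploiting that every group in LANG_CODE_MAP starts with its bare 2-letter code; the region guard becomes one .get with default.
import Mathlib
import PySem

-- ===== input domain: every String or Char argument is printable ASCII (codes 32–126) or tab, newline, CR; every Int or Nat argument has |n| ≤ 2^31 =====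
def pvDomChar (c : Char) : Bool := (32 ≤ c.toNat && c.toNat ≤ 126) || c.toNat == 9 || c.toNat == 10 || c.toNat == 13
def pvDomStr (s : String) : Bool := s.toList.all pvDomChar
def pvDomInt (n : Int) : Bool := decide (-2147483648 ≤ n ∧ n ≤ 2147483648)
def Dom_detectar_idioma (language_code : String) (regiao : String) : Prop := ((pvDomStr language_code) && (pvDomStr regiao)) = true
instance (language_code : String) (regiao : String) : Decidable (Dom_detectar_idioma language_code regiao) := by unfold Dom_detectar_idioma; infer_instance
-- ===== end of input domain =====

-- B replaces A's scan over LANG_CODE_MAP by a single 2-character-prefix table lookup (objective: simpler).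

-- ===== PORT A =====
def pvRegiaoIdioma : PySem.Dict String String := PySem.Dict.mk [
  ("BR","pt"),("US","en"),("UK","en"),("AU","en"),("CA","en"),("EU","en"),("CH","en"),
  ("AE","en"),("JP","ja"),("KR","ko"),("DK","en"),("SE","en"),("NO","en"),("MX","es")]

def pvLangCodeMap : PySem.Dict String String := PySem.Dict.mk [
  ("pt","pt"),("pt-br","pt"),("pt_br","pt"),
  ("es","es"),("es-419","es"),("es_mx","es"),("es_es","es"),
  ("fr","fr"),("fr-fr","fr"),("fr_fr","fr"),
  ("de","de"),("de-de","de"),("de_de","de"),("de-ch","de"),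
  ("it","it"),("it-it","it"),("it_it","it"),
  ("ja","ja"),("ja-jp","ja"),
  ("ko","ko"),("ko-kr","ko"),
  ("nl","nl"),("nl-nl","nl")]

-- the 'for code, idioma in LANG_CODE_MAP.items():' loop with its early return;
-- code.split("-")[0] is ported as .headD [] — exact, since split? with the nonempty
-- separator "-" always returns 'some' of a nonempty list of parts.
def pvLangScan (lang : List Char) : List (String × String) → Option String
  | [] => none
  | (code, idioma) :: rest =>
      if lang = PySem.Chars.replace code.toList ['-'] ['_']
          ∨ PySem.Chars.startswith lang (((PySem.Chars.split? code.toList ['-']).getD []).headD []) = true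
      then some idioma
      else pvLangScan lang rest

-- the tail of A after the region block ('if language_code: … return "en"')
def pvRefina (language_code : String) : String :=
  if language_code ≠ "" then
    let lang := PySem.Chars.replace (PySem.Chars.lower language_code.toList) ['-'] ['_']
    match pvLangScan lang pvLangCodeMap.items with
    | some idioma => idioma
    | none => "en"
  else "en"

def detectar_idioma (language_code : String) (regiao : String) : String :=
  if PySem.Dict.contains pvRegiaoIdioma regiao then
    -- REGIAO_IDIOMA[regiao]; the key is present, so the .getD "" default is never used
    let idioma_regiao := (PySem.Dict.get? pvRegiaoIdioma regiao).getD ""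
    if idioma_regiao ≠ "en" then idioma_regiao
    else pvRefina language_code
  else pvRefina language_code

-- ===== PORT B =====
-- (B's region table is the same module constant REGIAO_IDIOMA; pvRegiaoIdioma is shared)
def pvPrefixoIdioma : PySem.Dict (List Char) String := PySem.Dict.mk [
  (['p','t'],"pt"),(['e','s'],"es"),(['f','r'],"fr"),(['d','e'],"de"),
  (['i','t'],"it"),(['j','a'],"ja"),(['k','o'],"ko"),(['n','l'],"nl")]

def detectar_idioma_alt (language_code : String) (regiao : String) : String :=
  let idioma := PySem.Dict.getD pvRegiaoIdioma regiao "en"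
  if idioma ≠ "en" then idioma
  else
    let lang := PySem.Chars.replace (PySem.Chars.lower language_code.toList) ['-'] ['_']
    PySem.Dict.getD pvPrefixoIdioma (PySem.Chars.slice lang none (some 2)) "en"

-- ===== PRECONDITION & SPEC =====
def Spec_detectar_idioma (language_code : String) (regiao : String) (out : String) : Prop := out = detectar_idioma_alt language_code regiao
instance (language_code : String) (regiao : String) (out : String) : Decidable (Spec_detectar_idioma language_code regiao out) := by unfold Spec_detectar_idioma; infer_instance

-- ===== CLAIM (what is proved, stated in full; the proofs are below) =====
def Claim_equal_detectar_idioma : Prop := ∀ (language_code : String) (regiao : String), Dom_detectar_idioma language_code regiao → Spec_detectar_idioma language_code regiao (detectar_idioma language_code regiao)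

-- ===== LEMMAS AND PROOFS =====

lemma pvSlice2 (l : List Char) : PySem.Chars.slice l none (some 2) = l.take 2 := by
  have h := PySem.List.slice_to (xs := l) (b := (2 : Int)) (by norm_num)
  simpa using h

-- A's scan with each entry's constant parts (normalized key, primary prefix) evaluated
def pvNorm (p : String × String) : List Char × List Char × String :=
  (PySem.Chars.replace p.1.toList ['-'] ['_'],
   ((PySem.Chars.split? p.1.toList ['-']).getD []).headD [], p.2)

def pvScan2 (lang : List Char) : List (List Char × List Char × String) → Option String
  | [] => none
  | (k, pre, idioma) :: rest =>
      if lang = k ∨ PySem.Chars.startswith lang pre = true then some idioma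
      else pvScan2 lang rest

lemma pvScan_eq_scan2 (lang : List Char) :
    ∀ items, pvLangScan lang items = pvScan2 lang (items.map pvNorm) := by
  intro items
  induction items with
  | nil => rfl
  | cons p rest ih =>
      obtain ⟨code, idioma⟩ := p
      simp only [List.map_cons, pvLangScan, pvScan2, pvNorm]
      rw [ih]

lemma pvTab : pvLangCodeMap.items.map pvNorm =
    [ (['p','t'], ['p','t'], "pt"),
      (['p','t','_','b','r'], ['p','t'], "pt"),
      (['p','t','_','b','r'], ['p','t','_','b','r'], "pt"),
      (['e','s'], ['e','s'], "es"),
      (['e','s','_','4','1','9'], ['e','s'], "es"),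
      (['e','s','_','m','x'], ['e','s','_','m','x'], "es"),
      (['e','s','_','e','s'], ['e','s','_','e','s'], "es"),
      (['f','r'], ['f','r'], "fr"),
      (['f','r','_','f','r'], ['f','r'], "fr"),
      (['f','r','_','f','r'], ['f','r','_','f','r'], "fr"),
      (['d','e'], ['d','e'], "de"),
      (['d','e','_','d','e'], ['d','e'], "de"),
      (['d','e','_','d','e'], ['d','e','_','d','e'], "de"),
      (['d','e','_','c','h'], ['d','e'], "de"),
      (['i','t'], ['i','t'], "it"),
      (['i','t','_','i','t'], ['i','t'], "it"),
      (['i','t','_','i','t'], ['i','t','_','i','t'], "it"),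
      (['j','a'], ['j','a'], "ja"),
      (['j','a','_','j','p'], ['j','a'], "ja"),
      (['k','o'], ['k','o'], "ko"),
      (['k','o','_','k','r'], ['k','o'], "ko"),
      (['n','l'], ['n','l'], "nl"),
      (['n','l','_','n','l'], ['n','l'], "nl") ] := by rfl

-- core: on any char list, A's scan (defaulted to "en") is B's 2-char-prefix lookup
lemma pvScan_eq (l : List Char) :
    (match pvLangScan l pvLangCodeMap.items with
     | some idioma => idioma
     | none => "en") = PySem.Dict.getD pvPrefixoIdioma (l.take 2) "en" := by
  rw [pvScan_eq_scan2, pvTab]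
  match l with
  | [] => rfl
  | [c] =>
      simp [pvScan2, pvPrefixoIdioma, PySem.Dict.getD, PySem.Dict.get?, PySem.Chars.startswith_iff, List.cons_prefix_cons]
  | c0 :: c1 :: rest =>
      by_cases h0p : c0 = 'p'
      · subst h0p
        by_cases h1 : c1 = 't'
        · subst h1
          simp [pvScan2, pvPrefixoIdioma, PySem.Dict.getD, PySem.Dict.get?, PySem.Chars.startswith_iff, List.cons_prefix_cons]
        · simp [pvScan2, pvPrefixoIdioma, PySem.Dict.getD, PySem.Dict.get?, PySem.Chars.startswith_iff, List.cons_prefix_cons, h1, Ne.symm h1]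
      · by_cases h0e : c0 = 'e'
        · subst h0e
          by_cases h1 : c1 = 's'
          · subst h1
            simp [pvScan2, pvPrefixoIdioma, PySem.Dict.getD, PySem.Dict.get?, PySem.Chars.startswith_iff, List.cons_prefix_cons]
          · simp [pvScan2, pvPrefixoIdioma, PySem.Dict.getD, PySem.Dict.get?, PySem.Chars.startswith_iff, List.cons_prefix_cons, h1, Ne.symm h1]
        · by_cases h0f : c0 = 'f'
          · subst h0f
            by_cases h1 : c1 = 'r'
            · subst h1
              simp [pvScan2, pvPrefixoIdioma, PySem.Dict.getD, PySem.Dict.get?, PySem.Chars.startswith_iff, List.cons_prefix_cons]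
            · simp [pvScan2, pvPrefixoIdioma, PySem.Dict.getD, PySem.Dict.get?, PySem.Chars.startswith_iff, List.cons_prefix_cons, h1, Ne.symm h1]
          · by_cases h0d : c0 = 'd'
            · subst h0d
              by_cases h1 : c1 = 'e'
              · subst h1
                simp [pvScan2, pvPrefixoIdioma, PySem.Dict.getD, PySem.Dict.get?, PySem.Chars.startswith_iff, List.cons_prefix_cons]
              · simp [pvScan2, pvPrefixoIdioma, PySem.Dict.getD, PySem.Dict.get?, PySem.Chars.startswith_iff, List.cons_prefix_cons, h1, Ne.symm h1]
            · by_cases h0i : c0 = 'i'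
              · subst h0i
                by_cases h1 : c1 = 't'
                · subst h1
                  simp [pvScan2, pvPrefixoIdioma, PySem.Dict.getD, PySem.Dict.get?, PySem.Chars.startswith_iff, List.cons_prefix_cons]
                · simp [pvScan2, pvPrefixoIdioma, PySem.Dict.getD, PySem.Dict.get?, PySem.Chars.startswith_iff, List.cons_prefix_cons, h1, Ne.symm h1]
              · by_cases h0j : c0 = 'j'
                · subst h0j
                  by_cases h1 : c1 = 'a'
                  · subst h1
                    simp [pvScan2, pvPrefixoIdioma, PySem.Dict.getD, PySem.Dict.get?, PySem.Chars.startswith_iff, List.cons_prefix_cons]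
                  · simp [pvScan2, pvPrefixoIdioma, PySem.Dict.getD, PySem.Dict.get?, PySem.Chars.startswith_iff, List.cons_prefix_cons, h1, Ne.symm h1]
                · by_cases h0k : c0 = 'k'
                  · subst h0k
                    by_cases h1 : c1 = 'o'
                    · subst h1
                      simp [pvScan2, pvPrefixoIdioma, PySem.Dict.getD, PySem.Dict.get?, PySem.Chars.startswith_iff, List.cons_prefix_cons]
                    · simp [pvScan2, pvPrefixoIdioma, PySem.Dict.getD, PySem.Dict.get?, PySem.Chars.startswith_iff, List.cons_prefix_cons, h1, Ne.symm h1]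
                  · by_cases h0n : c0 = 'n'
                    · subst h0n
                      by_cases h1 : c1 = 'l'
                      · subst h1
                        simp [pvScan2, pvPrefixoIdioma, PySem.Dict.getD, PySem.Dict.get?, PySem.Chars.startswith_iff, List.cons_prefix_cons]
                      · simp [pvScan2, pvPrefixoIdioma, PySem.Dict.getD, PySem.Dict.get?, PySem.Chars.startswith_iff, List.cons_prefix_cons, h1, Ne.symm h1]
                    · simp [pvScan2, pvPrefixoIdioma, PySem.Dict.getD, PySem.Dict.get?, PySem.Chars.startswith_iff, List.cons_prefix_cons,
                            h0p, Ne.symm h0p, h0e, Ne.symm h0e, h0f, Ne.symm h0f, h0d, Ne.symm h0d, h0i, Ne.symm h0i, h0j, Ne.symm h0j, h0k, Ne.symm h0k, h0n, Ne.symm h0n]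

-- A's tail equals B's else-branch
lemma pvRefina_eq (language_code : String) :
    pvRefina language_code
      = PySem.Dict.getD pvPrefixoIdioma
          (PySem.Chars.slice (PySem.Chars.replace (PySem.Chars.lower language_code.toList) ['-'] ['_']) none (some 2))
          "en" := by
  rw [pvSlice2]
  by_cases hlc : language_code = ""
  · subst hlc; rfl
  · unfold pvRefina
    rw [if_pos hlc]
    exact pvScan_eq _

theorem detectar_idioma_spec_aux (language_code regiao : String) :
    detectar_idioma language_code regiao = detectar_idioma_alt language_code regiao := by
  unfold detectar_idioma detectar_idioma_alt
  rw [PySem.Dict.contains_eq_isSome_get?, PySem.Dict.getD_eq_get?_getD]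
  rcases hg : PySem.Dict.get? pvRegiaoIdioma regiao with _ | v
  · simpa using pvRefina_eq language_code
  · by_cases hv : v = "en"
    · subst hv; simpa using pvRefina_eq language_code
    · simp [hv]

-- ===== VERDICT (by name: the statement is the Claim_ definition above) =====
theorem detectar_idioma_spec : Claim_equal_detectar_idioma := by
  intro language_code regiao _
  exact detectar_idioma_spec_aux language_code regiao
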